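-- pv_equiv track=rewrite | github.com/knsrhuseyin/projet_dashboard | generate_tailwind.py | apply_variants
-- ===== SOURCE A (Python) =====
-- pseudo_states = ["hover","focus","active","disabled","visited","first","last","odd","even","checked","focus-within","focus-visible"]
--
-- screen_sizes = ["sm","md","lg","xl","2xl"]
--
-- dark_mode = ["dark"]
--
-- def apply_variants(base_classes):
--     all_classes = set()
--     for cls in base_classes:
--         all_classes.add(cls)
--         # pseudo-classes
--         for state in pseudo_states:
--             all_classes.add(f"{state}:{cls}")
--         # responsive
--         for screen in screen_sizes:
--             all_classes.add(f"{screen}:{cls}")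
--             for state in pseudo_states:
--                 all_classes.add(f"{screen}:{state}:{cls}")
--         # dark mode
--         for d in dark_mode:
--             all_classes.add(f"{d}:{cls}")
--             for state in pseudo_states:
--                 all_classes.add(f"{d}:{state}:{cls}")
--             for screen in screen_sizes:
--                 all_classes.add(f"{screen}:{d}:{cls}")
--                 for state in pseudo_states:
--                     all_classes.add(f"{screen}:{d}:{state}:{cls}")
--     return all_classes
-- ===== SOURCE B (Python) =====
-- pseudo_states = ["hover","focus","active","disabled","visited","first","last","odd","even","checked","focus-within","focus-visible"]
--
-- screen_sizes = ["sm","md","lg","xl","2xl"]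
--
-- dark_mode = ["dark"]
--
-- def apply_variants(base_classes):
--     # Flat counter 0..155 per class; divmod decodes each index into the optional
--     # screen / dark / state components (no nested loops over the constant lists).
--     n_states = len(pseudo_states) + 1          # 13: none or one pseudo state
--     n_screens = len(screen_sizes) + 1          # 6: none or one screen size
--     total = n_states * n_screens * (len(dark_mode) + 1)   # 156 variants per class
--     out = set()
--     for cls in base_classes:
--         for i in range(total):
--             head, t = divmod(i, n_states)
--             d, s = divmod(head, n_screens)
--             parts = []
--             if s:
--                 parts.append(screen_sizes[s - 1])
--             if d:
--                 parts.append(dark_mode[d - 1])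
--             if t:
--                 parts.append(pseudo_states[t - 1])
--             prefix = ":".join(parts)
--             out.add(cls if not prefix else f"{prefix}:{cls}")
--     return out
-- ===== Notes on version B (the rewrite author's own statement) =====
-- stated objective: alternative
-- what changed: B drops A's four nested loops over the constant variant lists and instead runs one flat counter 0..155 per class, decoding each index with divmod into its optional screen/dark/state components and joining them into the prefix.
import Mathlib
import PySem

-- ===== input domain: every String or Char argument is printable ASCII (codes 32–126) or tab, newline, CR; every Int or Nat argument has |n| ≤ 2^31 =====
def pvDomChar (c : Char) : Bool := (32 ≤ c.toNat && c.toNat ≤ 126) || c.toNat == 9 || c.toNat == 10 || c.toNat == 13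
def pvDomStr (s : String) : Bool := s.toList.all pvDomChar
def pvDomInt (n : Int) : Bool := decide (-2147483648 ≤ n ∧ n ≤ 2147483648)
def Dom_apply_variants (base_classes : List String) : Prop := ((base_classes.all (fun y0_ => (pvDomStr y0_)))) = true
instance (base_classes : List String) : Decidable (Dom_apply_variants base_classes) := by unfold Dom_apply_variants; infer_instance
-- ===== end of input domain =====

-- B replaces A's four nested loops over the constant variant lists with one flat counter
-- 0..155 per class, arithmetically decoded by divmod into the optional screen/dark/state
-- components (objective: alternative). Both return a Python set; only the set is claimed.

-- ===== PORT A =====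
def pseudo_states : List String :=
  ["hover","focus","active","disabled","visited","first","last","odd","even","checked","focus-within","focus-visible"]

def screen_sizes : List String := ["sm","md","lg","xl","2xl"]

def dark_mode : List String := ["dark"]

def apply_variants (base_classes : List String) : List String :=
  base_classes.foldl (fun all_classes cls =>
    let a1 := PySem.Set.add all_classes cls
    -- pseudo-classes
    let a2 := pseudo_states.foldl (fun a state => PySem.Set.add a (state ++ ":" ++ cls)) a1
    -- responsive
    let a3 := screen_sizes.foldl (fun a screen =>
      let b := PySem.Set.add a (screen ++ ":" ++ cls)
      pseudo_states.foldl (fun b state => PySem.Set.add b (screen ++ ":" ++ state ++ ":" ++ cls)) b) a2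
    -- dark mode
    dark_mode.foldl (fun a d =>
      let b1 := PySem.Set.add a (d ++ ":" ++ cls)
      let b2 := pseudo_states.foldl (fun b state => PySem.Set.add b (d ++ ":" ++ state ++ ":" ++ cls)) b1
      screen_sizes.foldl (fun b screen =>
        let c1 := PySem.Set.add b (screen ++ ":" ++ d ++ ":" ++ cls)
        pseudo_states.foldl (fun c state => PySem.Set.add c (screen ++ ":" ++ d ++ ":" ++ state ++ ":" ++ cls)) c1) b2) a3
  ) PySem.Set.empty

-- ===== PORT B =====
-- divmod decoding of a flat variant index 0..155 into its optional components, joined with ":"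
-- (list indexing is always in range here, so pyGet? … .getD "" is exact)
def decode_prefix (i : Int) : String :=
  let hd := PySem.Int.floordiv i 13
  let t  := PySem.Int.mod i 13
  let d  := PySem.Int.floordiv hd 6
  let s  := PySem.Int.mod hd 6
  let parts :=
    (if s ≠ 0 then [(PySem.List.pyGet? screen_sizes (s - 1)).getD ""] else [])
    ++ (if d ≠ 0 then [(PySem.List.pyGet? dark_mode (d - 1)).getD ""] else [])
    ++ (if t ≠ 0 then [(PySem.List.pyGet? pseudo_states (t - 1)).getD ""] else [])
  String.intercalate ":" parts

def apply_variants_alt (base_classes : List String) : List String :=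
  base_classes.foldl (fun out cls =>
    (PySem.List.pyRange 0 156 1).foldl (fun out i =>
      let p := decode_prefix i
      PySem.Set.add out (if p = "" then cls else p ++ ":" ++ cls)) out) PySem.Set.empty

-- ===== PRECONDITION & SPEC =====
def Spec_apply_variants (base_classes : List String) (out : List String) : Prop := out = apply_variants_alt base_classes
instance (base_classes : List String) (out : List String) : Decidable (Spec_apply_variants base_classes out) := by unfold Spec_apply_variants; infer_instance

-- ===== CLAIM (what is proved, stated in full; the proofs are below) =====
def Claim_equal_apply_variants : Prop := ∀ (base_classes : List String), Dom_apply_variants base_classes → Spec_apply_variants base_classes (apply_variants base_classes)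

-- ===== LEMMAS AND PROOFS =====

-- the decoded index range, evaluated
theorem decoded_prefixes_eq : (PySem.List.pyRange 0 156 1).map decode_prefix = ["", "hover", "focus", "active", "disabled", "visited", "first", "last", "odd", "even", "checked", "focus-within", "focus-visible", "sm", "sm:hover", "sm:focus", "sm:active", "sm:disabled", "sm:visited", "sm:first", "sm:last", "sm:odd", "sm:even", "sm:checked", "sm:focus-within", "sm:focus-visible", "md", "md:hover", "md:focus", "md:active", "md:disabled", "md:visited", "md:first", "md:last", "md:odd", "md:even", "md:checked", "md:focus-within", "md:focus-visible", "lg", "lg:hover", "lg:focus", "lg:active", "lg:disabled", "lg:visited", "lg:first", "lg:last", "lg:odd", "lg:even", "lg:checked", "lg:focus-within", "lg:focus-visible", "xl", "xl:hover", "xl:focus", "xl:active", "xl:disabled", "xl:visited", "xl:first", "xl:last", "xl:odd", "xl:even", "xl:checked", "xl:focus-within", "xl:focus-visible", "2xl", "2xl:hover", "2xl:focus", "2xl:active", "2xl:disabled", "2xl:visited", "2xl:first", "2xl:last", "2xl:odd", "2xl:even", "2xl:checked", "2xl:focus-within", "2xl:focus-visible", "dark", "dark:hover", "dark:focus", "dark:active",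 "dark:disabled", "dark:visited", "dark:first", "dark:last", "dark:odd", "dark:even", "dark:checked", "dark:focus-within", "dark:focus-visible", "sm:dark", "sm:dark:hover", "sm:dark:focus", "sm:dark:active", "sm:dark:disabled", "sm:dark:visited", "sm:dark:first", "sm:dark:last", "sm:dark:odd", "sm:dark:even", "sm:dark:checked", "sm:dark:focus-within", "sm:dark:focus-visible", "md:dark", "md:dark:hover", "md:dark:focus", "md:dark:active", "md:dark:disabled", "md:dark:visited", "md:dark:first", "md:dark:last", "md:dark:odd", "md:dark:even", "md:dark:checked", "md:dark:focus-within", "md:dark:focus-visible", "lg:dark", "lg:dark:hover", "lg:dark:focus", "lg:dark:active", "lg:dark:disabled", "lg:dark:visited", "lg:dark:first", "lg:dark:last", "lg:dark:odd", "lg:dark:even", "lg:dark:checked", "lg:dark:focus-within", "lg:dark:focus-visible", "xl:dark", "xl:dark:hover", "xl:dark:focus", "xl:dark:active", "xl:dark:disabled", "xl:dark:visited", "xl:dark:first", "xl:dark:last", "xl:dark:odd", "xl:dark:even", "xl:dark:checked", "xl:dark:focus-within", "xl:dark:focus-visible", "2xl:dark", "2xl:dark:hover", "2xl:dark:focus",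 "2xl:dark:active", "2xl:dark:disabled", "2xl:dark:visited", "2xl:dark:first", "2xl:dark:last", "2xl:dark:odd", "2xl:dark:even", "2xl:dark:checked", "2xl:dark:focus-within", "2xl:dark:focus-visible"] := by
  set_option maxRecDepth 4096 in decide

-- A's per-class nested loops insert exactly what B's decoded flat pass inserts, in the same order
theorem step_eq (s : PySem.Set String) (cls : String) :
    (let a1 := PySem.Set.add s cls
     let a2 := pseudo_states.foldl (fun a state => PySem.Set.add a (state ++ ":" ++ cls)) a1
     let a3 := screen_sizes.foldl (fun a screen =>
       let b := PySem.Set.add a (screen ++ ":" ++ cls)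
       pseudo_states.foldl (fun b state => PySem.Set.add b (screen ++ ":" ++ state ++ ":" ++ cls)) b) a2
     dark_mode.foldl (fun a d =>
       let b1 := PySem.Set.add a (d ++ ":" ++ cls)
       let b2 := pseudo_states.foldl (fun b state => PySem.Set.add b (d ++ ":" ++ state ++ ":" ++ cls)) b1
       screen_sizes.foldl (fun b screen =>
         let c1 := PySem.Set.add b (screen ++ ":" ++ d ++ ":" ++ cls)
         pseudo_states.foldl (fun c state => PySem.Set.add c (screen ++ ":" ++ d ++ ":" ++ state ++ ":" ++ cls)) c1) b2) a3)
    = (PySem.List.pyRange 0 156 1).foldl (fun out i =>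
        let p := decode_prefix i
        PySem.Set.add out (if p = "" then cls else p ++ ":" ++ cls)) s := by
  have h : (PySem.List.pyRange 0 156 1).foldl (fun out i =>
        let p := decode_prefix i
        PySem.Set.add out (if p = "" then cls else p ++ ":" ++ cls)) s
      = ((PySem.List.pyRange 0 156 1).map decode_prefix).foldl
          (fun out p => PySem.Set.add out (if p = "" then cls else p ++ ":" ++ cls)) s := by
    rw [List.foldl_map]
  rw [h, decoded_prefixes_eq]
  simp only [pseudo_states, screen_sizes, dark_mode,
    List.foldl_cons, List.foldl_nil]
  simp only [reduceIte, String.reduceEq, String.reduceAppend]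

-- ===== VERDICT (by name: the statement is the Claim_ definition above) =====
theorem apply_variants_spec : Claim_equal_apply_variants := by
  intro base_classes _
  unfold Spec_apply_variants apply_variants apply_variants_alt
  apply PySem.List.foldl_congr_mem
  intro s cls _
  exact step_eq s cls
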